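-- pv_equiv track=rewrite | github.com/DrM00G/machine-learning | analysis/signal_separation.py | transform_polynomial_data
-- ===== SOURCE A (Python) =====
-- def transform_polynomial_data(data, degree):
--     new_data = [[data[x][0]**i for i in range(degree+1)] + [data[x][1]] for x in range(len(data))]
--     data_dict = {}
--     for x in range(len(new_data)):
--         for y in range(len(new_data[0])):
--             if str(y) in data_dict:
--                 data_dict[str(y)].append(new_data[x][y])
--             else:
--                 data_dict[str(y)] = [new_data[x][y]]
--     return data_dict
-- ===== SOURCE B (Python) =====
-- def transform_polynomial_data(data, degree):
--     columns = [[row[0] ** i for row in data] for i in range(degree + 1)]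
--     columns.append([row[1] for row in data])
--     return {str(i): col for i, col in enumerate(columns)}
-- ===== Notes on version B (the rewrite author's own statement) =====
-- stated objective: simpler
-- what changed: B drops A's intermediate new_data matrix and the nested row-by-row dict transpose loop: it builds the power columns and the label column directly, one comprehension per column, and enumerates them into the dict; Pre_ excludes empty data, where A's {} and B's dict of empty columns are both defensible, and rows shorter than 2, on which A raises IndexError.
-- outside the precondition, e.g. on transform_polynomial_data([], 0): A returns {}, B returns {'0': [], '1': []}
import Mathlib
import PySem

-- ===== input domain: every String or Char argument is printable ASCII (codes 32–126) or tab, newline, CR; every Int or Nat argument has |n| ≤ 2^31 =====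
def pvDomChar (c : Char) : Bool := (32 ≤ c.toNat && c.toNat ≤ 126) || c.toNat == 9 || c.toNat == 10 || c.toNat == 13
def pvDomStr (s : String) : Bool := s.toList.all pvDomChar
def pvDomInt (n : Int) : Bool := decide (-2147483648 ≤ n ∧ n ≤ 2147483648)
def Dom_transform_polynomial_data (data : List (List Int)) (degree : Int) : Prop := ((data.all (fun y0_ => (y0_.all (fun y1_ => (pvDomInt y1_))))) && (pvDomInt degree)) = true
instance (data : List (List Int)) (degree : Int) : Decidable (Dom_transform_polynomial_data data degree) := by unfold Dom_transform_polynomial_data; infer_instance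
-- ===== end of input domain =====

-- B replaces A's intermediate polynomial-feature matrix and nested transpose-into-dict loop
-- by building each output column directly (one comprehension per column) and enumerating the
-- columns into the dict (objective: simpler).

-- ===== PORT A =====
def transform_polynomial_data (data : List (List Int)) (degree : Int) : List (String × List Int) :=
  let new_data : List (List Int) :=
    (PySem.List.pyRange 0 (PySem.List.len data) 1).map (fun x =>
      (PySem.List.pyRange 0 (degree + 1) 1).map (fun i =>
        (PySem.List.pyGetD (PySem.List.pyGetD data x []) 0 0) ^ i.toNat)
      ++ [PySem.List.pyGetD (PySem.List.pyGetD data x []) 1 0])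
  let data_dict : PySem.Dict String (List Int) :=
    (PySem.List.pyRange 0 (PySem.List.len new_data) 1).foldl (fun d x =>
      (PySem.List.pyRange 0 (PySem.List.len (PySem.List.pyGetD new_data 0 [])) 1).foldl (fun d y =>
        if d.contains (PySem.Int.toStr y) then
          d.insert (PySem.Int.toStr y)
            (d.getD (PySem.Int.toStr y) [] ++ [PySem.List.pyGetD (PySem.List.pyGetD new_data x []) y 0])
        else
          d.insert (PySem.Int.toStr y) [PySem.List.pyGetD (PySem.List.pyGetD new_data x []) y 0]) d)
      PySem.Dict.empty
  data_dict.items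

-- ===== PORT B =====
def transform_polynomial_data_alt (data : List (List Int)) (degree : Int) : List (String × List Int) :=
  let columns : List (List Int) :=
    (PySem.List.pyRange 0 (degree + 1) 1).map (fun i =>
      data.map (fun row => (PySem.List.pyGetD row 0 0) ^ i.toNat))
  let columns := columns ++ [data.map (fun row => PySem.List.pyGetD row 1 0)]
  ((PySem.List.enumerate columns).foldl
      (fun d p => d.insert (PySem.Int.toStr p.1) p.2) PySem.Dict.empty).items

-- ===== PRECONDITION & SPEC =====
-- Pre_ excludes rows shorter than 2 (there Python A raises IndexError) and the empty data list
-- (a corner where A's {} and B's dict of degree+2 empty columns are both defensible values).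
def Pre_transform_polynomial_data (data : List (List Int)) (degree : Int) : Prop :=
  data ≠ [] ∧ ∀ row ∈ data, 2 ≤ row.length
instance (data : List (List Int)) (degree : Int) : Decidable (Pre_transform_polynomial_data data degree) := by
  unfold Pre_transform_polynomial_data; infer_instance
def pvWitness_transform_polynomial_data : List (List Int) × Int := ([[1, 2], [3, 4]], 2)

def Spec_transform_polynomial_data (data : List (List Int)) (degree : Int) (out : List (String × List Int)) : Prop := out = transform_polynomial_data_alt data degree
instance (data : List (List Int)) (degree : Int) (out : List (String × List Int)) : Decidable (Spec_transform_polynomial_data data degree out) := by unfold Spec_transform_polynomial_data; infer_instance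

-- ===== CLAIM (what is proved, stated in full; the proofs are below) =====
def Claim_equal_transform_polynomial_data : Prop := ∀ (data : List (List Int)) (degree : Int), Dom_transform_polynomial_data data degree → Pre_transform_polynomial_data data degree → Spec_transform_polynomial_data data degree (transform_polynomial_data data degree)

-- ===== LEMMAS AND PROOFS =====

-- str(·) is injective on the decimal digits
theorem pv_digitChar_inj : ∀ a b : Fin 10, Nat.digitChar a = Nat.digitChar b → a = b := by decide

theorem pv_digitChar_inj' {a b : Nat} (ha : a < 10) (hb : b < 10)
    (h : Nat.digitChar a = Nat.digitChar b) : a = b := by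
  have := pv_digitChar_inj ⟨a, ha⟩ ⟨b, hb⟩ h
  simpa [Fin.ext_iff] using this

-- Nat.toDigits 10 is injective
theorem pv_toDigits_inj : ∀ a b : Nat, Nat.toDigits 10 a = Nat.toDigits 10 b → a = b := by
  intro a
  induction a using Nat.strong_induction_on with
  | _ a ih =>
    intro b h
    by_cases ha : a < 10 <;> by_cases hb : b < 10
    · rw [Nat.toDigits_of_lt_base ha, Nat.toDigits_of_lt_base hb] at h
      exact pv_digitChar_inj' ha hb (List.head_eq_of_cons_eq h)
    · rw [Nat.toDigits_of_lt_base ha,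
        Nat.toDigits_of_base_le (by norm_num) (Nat.le_of_not_lt hb)] at h
      have hlen := congrArg List.length h
      simp only [List.length_cons, List.length_append, List.length_nil] at hlen
      have := @Nat.length_toDigits_pos 10 (b / 10)
      omega
    · rw [Nat.toDigits_of_lt_base hb,
        Nat.toDigits_of_base_le (by norm_num) (Nat.le_of_not_lt ha)] at h
      have hlen := congrArg List.length h
      simp only [List.length_cons, List.length_append, List.length_nil] at hlen
      have := @Nat.length_toDigits_pos 10 (a / 10)
      omega
    · rw [Nat.toDigits_of_base_le (by norm_num) (Nat.le_of_not_lt ha),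
        Nat.toDigits_of_base_le (by norm_num) (Nat.le_of_not_lt hb)] at h
      rw [← List.concat_eq_append, ← List.concat_eq_append, List.concat_inj] at h
      have h1 : a / 10 = b / 10 :=
        ih (a / 10) (Nat.div_lt_self (by omega) (by norm_num)) _ h.1
      have h2 : a % 10 = b % 10 :=
        pv_digitChar_inj' (Nat.mod_lt _ (by norm_num)) (Nat.mod_lt _ (by norm_num)) h.2
      omega

theorem pv_toStr_inj {a b : Int} (ha : 0 ≤ a) (hb : 0 ≤ b)
    (h : PySem.Int.toStr a = PySem.Int.toStr b) : a = b := by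
  have h' : PySem.Int.toChars a = PySem.Int.toChars b := by
    have := congrArg String.toList h
    simpa [PySem.Int.toList_toStr] using this
  unfold PySem.Int.toChars at h'
  rw [if_neg (by omega), if_neg (by omega)] at h'
  have := pv_toDigits_inj _ _ h'
  omega

-- the keys str(0), …, str(m-1) are distinct
theorem pv_nodup_keys (m : Int) : ((PySem.List.pyRange 0 m 1).map PySem.Int.toStr).Nodup := by
  refine (PySem.List.nodup_pyRange_one 0 m).map_on ?_
  intro x hx y hy h
  rw [PySem.List.mem_pyRange_one] at hx hy
  exact pv_toStr_inj hx.1 hy.1 h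

-- A's loop body is one unconditional insert
theorem pv_body_eq (d : PySem.Dict String (List Int)) (k : String) (v : Int) :
    (if d.contains k then d.insert k (d.getD k [] ++ [v]) else d.insert k [v])
      = d.insert k (d.getD k [] ++ [v]) := by
  split_ifs with h
  · rfl
  · rw [PySem.Dict.getD_of_not_contains d [] (by simpa using h)]
    simp

-- proof-side abbreviation: the row of polynomial features A builds for one input row
def pvRowf (degree : Int) (row : List Int) : List Int :=
  (PySem.List.pyRange 0 (degree + 1) 1).map (fun i => (PySem.List.pyGetD row 0 0) ^ i.toNat)
  ++ [PySem.List.pyGetD row 1 0]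

-- folding fresh keys appends one singleton column per key
theorem pv_fold_fresh (r : List Int) :
    ∀ (ys : List Int) (d : PySem.Dict String (List Int)),
      (∀ y ∈ ys, d.contains (PySem.Int.toStr y) = false) →
      (ys.map PySem.Int.toStr).Nodup →
      (ys.foldl (fun d y =>
          d.insert (PySem.Int.toStr y) (d.getD (PySem.Int.toStr y) [] ++ [PySem.List.pyGetD r y 0])) d).items
        = d.items ++ ys.map (fun y => (PySem.Int.toStr y, [PySem.List.pyGetD r y 0])) := by
  intro ys
  induction ys with
  | nil => intro d _ _; simp
  | cons y ys ih =>
    intro d hfresh hnd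
    have hy : d.contains (PySem.Int.toStr y) = false := hfresh y (by simp)
    have hstep : (d.insert (PySem.Int.toStr y)
          (d.getD (PySem.Int.toStr y) [] ++ [PySem.List.pyGetD r y 0])).items
        = d.items ++ [(PySem.Int.toStr y, [PySem.List.pyGetD r y 0])] := by
      rw [PySem.Dict.getD_of_not_contains d [] hy]
      exact PySem.Dict.items_insert_of_not_contains d _ hy
    simp only [List.foldl_cons]
    rw [ih _ ?_ (by simpa using List.Nodup.of_cons (by simpa using hnd))]
    · rw [hstep]; simp
    · intro y' hy'
      rw [PySem.Dict.contains_insert]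
      have hne : PySem.Int.toStr y' ≠ PySem.Int.toStr y := by
        intro hcontr
        have hmem : PySem.Int.toStr y ∈ ys.map PySem.Int.toStr := hcontr ▸ List.mem_map_of_mem hy'
        exact (List.nodup_cons.mp (by simpa using hnd)).1 hmem
      simp [hne, hfresh y' (List.mem_cons_of_mem _ hy')]

-- folding over keys that are all present appends one value to each column, in place
theorem pv_fold_step (r : List Int) :
    ∀ (ys : List Int) (g : Int → List Int) (pre : List (String × List Int))
      (d : PySem.Dict String (List Int)),
      d.items = pre ++ ys.map (fun y => (PySem.Int.toStr y, g y)) →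
      (d.items.map Prod.fst).Nodup →
      (ys.foldl (fun d y =>
          d.insert (PySem.Int.toStr y) (d.getD (PySem.Int.toStr y) [] ++ [PySem.List.pyGetD r y 0])) d).items
        = pre ++ ys.map (fun y => (PySem.Int.toStr y, g y ++ [PySem.List.pyGetD r y 0])) := by
  intro ys
  induction ys with
  | nil => intro g pre d hitems _; simpa using hitems
  | cons y ys ih =>
    intro g pre d hitems hnd
    have hkeys : d.keys = d.items.map Prod.fst := rfl
    have hmem : (PySem.Int.toStr y, g y) ∈ d.items := by rw [hitems]; simp
    have hcont : d.contains (PySem.Int.toStr y) = true := by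
      rw [PySem.Dict.contains_iff_mem_keys, hkeys]
      exact List.mem_map_of_mem hmem
    have hget : d.getD (PySem.Int.toStr y) [] = g y :=
      PySem.Dict.getD_of_mem_items d hmem (hkeys ▸ hnd) []
    have hndk2 : (pre.map Prod.fst
        ++ PySem.Int.toStr y :: ys.map (fun y => PySem.Int.toStr y)).Nodup := by
      have h0 := hnd
      rw [hitems] at h0
      simpa [List.map_map, Function.comp] using h0
    obtain ⟨hnp, hnt, hdisj⟩ := List.nodup_append.mp hndk2
    have hpre_ne : ∀ p ∈ pre, p.1 ≠ PySem.Int.toStr y := by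
      intro p hp
      exact hdisj _ (List.mem_map_of_mem hp) _ (by simp)
    have htail_ne : ∀ y' ∈ ys, PySem.Int.toStr y' ≠ PySem.Int.toStr y := by
      intro y' hy' hcontr
      exact (List.nodup_cons.mp hnt).1 (hcontr ▸ List.mem_map_of_mem hy')
    have e1 : pre.map (fun p => if (p.1 == PySem.Int.toStr y) = true
          then (PySem.Int.toStr y, g y ++ [PySem.List.pyGetD r y 0]) else p) = pre := by
      conv_rhs => rw [← List.map_id pre]
      apply List.map_congr_left
      intro p hp
      simp [hpre_ne p hp]
    have e2 : (ys.map (fun y => (PySem.Int.toStr y, g y))).map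
          (fun p => if (p.1 == PySem.Int.toStr y) = true
            then (PySem.Int.toStr y, g y ++ [PySem.List.pyGetD r y 0]) else p)
        = ys.map (fun y => (PySem.Int.toStr y, g y)) := by
      rw [List.map_map]
      apply List.map_congr_left
      intro y' hy'
      simp [Function.comp, htail_ne y' hy']
    have hstep : (d.insert (PySem.Int.toStr y) (g y ++ [PySem.List.pyGetD r y 0])).items
        = (pre ++ [(PySem.Int.toStr y, g y ++ [PySem.List.pyGetD r y 0])])
            ++ ys.map (fun y => (PySem.Int.toStr y, g y)) := by
      rw [PySem.Dict.items_insert_of_contains d _ hcont, hitems, List.map_append, List.map_cons,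
        List.map_cons, e1, e2]
      simp
    simp only [List.foldl_cons]
    rw [hget, ih g (pre ++ [(PySem.Int.toStr y, g y ++ [PySem.List.pyGetD r y 0])]) _ hstep ?_]
    · simp
    · rw [hstep]
      simpa [List.map_map, Function.comp] using hndk2

-- the outer loop: one pv_fold_step per remaining row
theorem pv_fold_rows (ys : List Int) :
    ∀ (rows : List (List Int)) (g : Int → List Int) (d : PySem.Dict String (List Int)),
      d.items = ys.map (fun y => (PySem.Int.toStr y, g y)) →
      (ys.map PySem.Int.toStr).Nodup →
      (rows.foldl (fun d r => ys.foldl (fun d y =>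
          d.insert (PySem.Int.toStr y) (d.getD (PySem.Int.toStr y) [] ++ [PySem.List.pyGetD r y 0])) d) d).items
        = ys.map (fun y => (PySem.Int.toStr y, g y ++ rows.map (fun r => PySem.List.pyGetD r y 0))) := by
  intro rows
  induction rows with
  | nil => intro g d hitems _; simpa using hitems
  | cons r rows ih =>
    intro g d hitems hnd
    simp only [List.foldl_cons]
    have hndk : (d.items.map Prod.fst).Nodup := by
      rw [hitems, List.map_map]
      simpa [Function.comp] using hnd
    have h1 := pv_fold_step r ys g [] d (by simpa using hitems) hndk
    have h2 := ih (fun y => g y ++ [PySem.List.pyGetD r y 0]) _ (by simpa using h1) hnd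
    rw [h2]
    simp

-- building A's matrix row by row over range(len(data)) is a map over data
theorem pv_map_rows {α β : Type} (xs : List α) (dflt : α) (h : α → β) :
    (PySem.List.pyRange 0 (PySem.List.len xs) 1).map
        (fun x => h (PySem.List.pyGetD xs x dflt)) = xs.map h := by
  rw [show (fun x => h (PySem.List.pyGetD xs x dflt))
      = h ∘ (fun x => PySem.List.pyGetD xs x dflt) from rfl]
  rw [← List.map_map, PySem.List.map_pyGetD_pyRange_zero]

-- one row of A's matrix, read at column y, is the y-entry of B's column
theorem pv_col (degree : Int) (row : List Int) (y : Int) (h0 : 0 ≤ y)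
    (h1 : y < max (degree + 1) 0 + 1) :
    PySem.List.pyGetD (pvRowf degree row) y 0
      = if y < max (degree + 1) 0 then (PySem.List.pyGetD row 0 0) ^ y.toNat
        else PySem.List.pyGetD row 1 0 := by
  unfold pvRowf
  have hPlen : ((PySem.List.pyRange 0 (degree + 1) 1).map
      (fun i => (PySem.List.pyGetD row 0 0) ^ i.toNat)).length = (degree + 1).toNat := by
    simp [PySem.List.length_pyRange_one]
  have hcast : ((degree + 1).toNat : Int) = max (degree + 1) 0 := Int.toNat_eq_max _
  have hlen2 : y < ((((PySem.List.pyRange 0 (degree + 1) 1).map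
      (fun i => (PySem.List.pyGetD row 0 0) ^ i.toNat))
      ++ [PySem.List.pyGetD row 1 0]).length : Int) := by
    rw [List.length_append, hPlen, List.length_singleton]
    push_cast [hcast]
    omega
  rw [PySem.List.pyGetD_eq_getElem _ 0 h0 hlen2]
  split_ifs with hc
  · have hlt : y.toNat < ((PySem.List.pyRange 0 (degree + 1) 1).map
        (fun i => (PySem.List.pyGetD row 0 0) ^ i.toNat)).length := by
      rw [hPlen]; omega
    rw [List.getElem_append_left hlt, List.getElem_map, PySem.List.getElem_pyRange_one]
    congr 1
    omega
  · have hge : ((PySem.List.pyRange 0 (degree + 1) 1).map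
        (fun i => (PySem.List.pyGetD row 0 0) ^ i.toNat)).length ≤ y.toNat := by
      rw [hPlen]; omega
    rw [List.getElem_append_right hge]
    simp

-- B's column list, read at index y, is the power column or the label column
theorem pv_colB (degree : Int) (data : List (List Int)) (y : Int) (h0 : 0 ≤ y)
    (h1 : y < max (degree + 1) 0 + 1) :
    PySem.List.pyGetD
      (((PySem.List.pyRange 0 (degree + 1) 1).map (fun i =>
          data.map (fun row => (PySem.List.pyGetD row 0 0) ^ i.toNat)))
        ++ [data.map (fun row => PySem.List.pyGetD row 1 0)]) y []
      = if y < max (degree + 1) 0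
          then data.map (fun row => (PySem.List.pyGetD row 0 0) ^ y.toNat)
          else data.map (fun row => PySem.List.pyGetD row 1 0) := by
  have hPlen : ((PySem.List.pyRange 0 (degree + 1) 1).map (fun i =>
      data.map (fun row => (PySem.List.pyGetD row 0 0) ^ i.toNat))).length = (degree + 1).toNat := by
    simp [PySem.List.length_pyRange_one]
  have hcast : ((degree + 1).toNat : Int) = max (degree + 1) 0 := Int.toNat_eq_max _
  have hlen2 : y < (((((PySem.List.pyRange 0 (degree + 1) 1).map (fun i =>
      data.map (fun row => (PySem.List.pyGetD row 0 0) ^ i.toNat)))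
      ++ [data.map (fun row => PySem.List.pyGetD row 1 0)]).length : Nat) : Int) := by
    simp only [List.length_append, hPlen, List.length_singleton]
    push_cast [hcast]
    omega
  rw [PySem.List.pyGetD_eq_getElem _ [] h0 hlen2]
  split_ifs with hc
  · have hlt : y.toNat < ((PySem.List.pyRange 0 (degree + 1) 1).map (fun i =>
        data.map (fun row => (PySem.List.pyGetD row 0 0) ^ i.toNat))).length := by
      rw [hPlen]; omega
    rw [List.getElem_append_left hlt, List.getElem_map, PySem.List.getElem_pyRange_one]
    have hyt : (0 + (y.toNat : Int)).toNat = y.toNat := by omega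
    rw [hyt]
  · have hge : ((PySem.List.pyRange 0 (degree + 1) 1).map (fun i =>
        data.map (fun row => (PySem.List.pyGetD row 0 0) ^ i.toNat))).length ≤ y.toNat := by
      rw [hPlen]; omega
    rw [List.getElem_append_right hge]
    simp

-- folding a list of (index, column) pairs with fresh distinct keys appends them in order
theorem pv_fold_pairs :
    ∀ (ps : List (Int × List Int)) (d : PySem.Dict String (List Int)),
      (∀ p ∈ ps, d.contains (PySem.Int.toStr p.1) = false) →
      (ps.map (fun p => PySem.Int.toStr p.1)).Nodup →
      (ps.foldl (fun d p => d.insert (PySem.Int.toStr p.1) p.2) d).items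
        = d.items ++ ps.map (fun p => (PySem.Int.toStr p.1, p.2)) := by
  intro ps
  induction ps with
  | nil => intro d _ _; simp
  | cons p ps ih =>
    intro d hfresh hnd
    have hp : d.contains (PySem.Int.toStr p.1) = false := hfresh p (by simp)
    have hstep : (d.insert (PySem.Int.toStr p.1) p.2).items
        = d.items ++ [(PySem.Int.toStr p.1, p.2)] :=
      PySem.Dict.items_insert_of_not_contains d _ hp
    simp only [List.foldl_cons]
    rw [ih _ ?_ (by simpa using List.Nodup.of_cons (by simpa using hnd))]
    · rw [hstep]; simp
    · intro p' hp'
      rw [PySem.Dict.contains_insert]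
      have hne : PySem.Int.toStr p'.1 ≠ PySem.Int.toStr p.1 := by
        intro hcontr
        have hmem : PySem.Int.toStr p.1 ∈ ps.map (fun p => PySem.Int.toStr p.1) :=
          hcontr ▸ List.mem_map_of_mem hp'
        exact (List.nodup_cons.mp (by simpa using hnd)).1 hmem
      simp [hne, hfresh p' (List.mem_cons_of_mem _ hp')]

-- B in closed map form
theorem pv_alt_eq (data : List (List Int)) (degree : Int) :
    transform_polynomial_data_alt data degree
      = (PySem.List.pyRange 0 (max (degree + 1) 0 + 1) 1).map (fun y =>
          (PySem.Int.toStr y,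
           if y < max (degree + 1) 0
             then data.map (fun row => (PySem.List.pyGetD row 0 0) ^ y.toNat)
             else data.map (fun row => PySem.List.pyGetD row 1 0))) := by
  unfold transform_polynomial_data_alt
  set cols : List (List Int) :=
    ((PySem.List.pyRange 0 (degree + 1) 1).map (fun i =>
        data.map (fun row => (PySem.List.pyGetD row 0 0) ^ i.toNat)))
      ++ [data.map (fun row => PySem.List.pyGetD row 1 0)] with hcols
  have hfst : (PySem.List.enumerate cols 0).map (fun p => PySem.Int.toStr p.1)
      = (PySem.List.pyRange 0 (0 + (cols.length : Int)) 1).map PySem.Int.toStr := by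
    rw [show (fun p : Int × List Int => PySem.Int.toStr p.1)
        = PySem.Int.toStr ∘ (fun p : Int × List Int => p.1) from rfl]
    rw [← List.map_map, PySem.List.map_fst_enumerate]
  have hnd : ((PySem.List.enumerate cols 0).map (fun p => PySem.Int.toStr p.1)).Nodup := by
    rw [hfst]
    exact pv_nodup_keys _
  rw [pv_fold_pairs (PySem.List.enumerate cols 0) PySem.Dict.empty
      (fun _ _ => PySem.Dict.contains_empty _) hnd]
  have hemp : (PySem.Dict.empty : PySem.Dict String (List Int)).items = [] := rfl
  rw [hemp, List.nil_append]
  rw [PySem.List.enumerate_eq_map_pyRange cols ([] : List Int)]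
  rw [List.map_map]
  have hM : ((cols.length : Nat) : Int) = max (degree + 1) 0 + 1 := by
    rw [hcols]
    simp only [List.length_append, List.length_map, PySem.List.length_pyRange_one,
      List.length_singleton]
    push_cast [Int.toNat_eq_max]
    omega
  simp only [PySem.List.len_eq]
  rw [hM]
  apply List.map_congr_left
  intro y hy
  rw [PySem.List.mem_pyRange_one] at hy
  simp only [Function.comp_apply]
  rw [hcols]
  rw [pv_colB degree data y hy.1 hy.2]

-- A in the same closed map form, for non-empty data
theorem pv_A_eq (row0 : List Int) (rest : List (List Int)) (degree : Int) :
    transform_polynomial_data (row0 :: rest) degree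
      = (PySem.List.pyRange 0 (max (degree + 1) 0 + 1) 1).map (fun y =>
          (PySem.Int.toStr y,
           (row0 :: rest).map (fun r => PySem.List.pyGetD (pvRowf degree r) y 0))) := by
  simp only [transform_polynomial_data]
  have hrw : (PySem.List.pyRange 0 (PySem.List.len (row0 :: rest)) 1).map
      (fun x =>
        (PySem.List.pyRange 0 (degree + 1) 1).map
          (fun i => (PySem.List.pyGetD (PySem.List.pyGetD (row0 :: rest) x []) 0 0) ^ i.toNat)
        ++ [PySem.List.pyGetD (PySem.List.pyGetD (row0 :: rest) x []) 1 0])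
      = (row0 :: rest).map (pvRowf degree) :=
    pv_map_rows (row0 :: rest) [] (pvRowf degree)
  rw [hrw]
  simp only [pv_body_eq]
  rw [List.map_cons, PySem.List.pyGetD_zero_cons]
  simp only [PySem.List.len_eq]
  have hfold : List.foldl
      (fun d x => List.foldl
        (fun d y => d.insert (PySem.Int.toStr y)
          (d.getD (PySem.Int.toStr y) []
            ++ [PySem.List.pyGetD (PySem.List.pyGetD
                  (pvRowf degree row0 :: rest.map (pvRowf degree)) x []) y 0])) d
        (PySem.List.pyRange 0 ((pvRowf degree row0).length : Int) 1))
      PySem.Dict.empty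
      (PySem.List.pyRange 0 (((pvRowf degree row0 :: rest.map (pvRowf degree)).length : Nat) : Int) 1)
      = List.foldl
      (fun d r => List.foldl
        (fun d y => d.insert (PySem.Int.toStr y)
          (d.getD (PySem.Int.toStr y) [] ++ [PySem.List.pyGetD r y 0])) d
        (PySem.List.pyRange 0 ((pvRowf degree row0).length : Int) 1))
      PySem.Dict.empty
      (pvRowf degree row0 :: rest.map (pvRowf degree)) :=
    PySem.List.foldl_pyRange_zero_pyGetD' (pvRowf degree row0 :: rest.map (pvRowf degree)) []
      (fun d r => List.foldl
        (fun d y => d.insert (PySem.Int.toStr y)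
          (d.getD (PySem.Int.toStr y) [] ++ [PySem.List.pyGetD r y 0])) d
        (PySem.List.pyRange 0 ((pvRowf degree row0).length : Int) 1))
      PySem.Dict.empty
  rw [hfold]
  rw [List.foldl_cons]
  have hnodup := pv_nodup_keys ((pvRowf degree row0).length : Int)
  have h1 := pv_fold_fresh (pvRowf degree row0)
    (PySem.List.pyRange 0 ((pvRowf degree row0).length : Int) 1) PySem.Dict.empty
    (fun _ _ => PySem.Dict.contains_empty _) hnodup
  rw [pv_fold_rows (PySem.List.pyRange 0 ((pvRowf degree row0).length : Int) 1)
    (rest.map (pvRowf degree))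
    (fun y => [PySem.List.pyGetD (pvRowf degree row0) y 0]) _ (by simpa using h1) hnodup]
  have hM : (((pvRowf degree row0).length : Nat) : Int) = max (degree + 1) 0 + 1 := by
    simp [pvRowf, PySem.List.length_pyRange_one]
  rw [hM]
  apply List.map_congr_left
  intro y hy
  simp [List.map_map, Function.comp]

-- the ports agree on every non-empty input
theorem pv_main (data : List (List Int)) (degree : Int) (hne : data ≠ []) :
    transform_polynomial_data data degree = transform_polynomial_data_alt data degree := by
  match data with
  | [] => exact absurd rfl hne
  | row0 :: rest =>
    rw [pv_A_eq row0 rest degree, pv_alt_eq (row0 :: rest) degree]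
    apply List.map_congr_left
    intro y hy
    rw [PySem.List.mem_pyRange_one] at hy
    refine congrArg (Prod.mk (PySem.Int.toStr y)) ?_
    have hcol : ∀ r ∈ (row0 :: rest), PySem.List.pyGetD (pvRowf degree r) y 0
        = if y < max (degree + 1) 0 then (PySem.List.pyGetD r 0 0) ^ y.toNat
          else PySem.List.pyGetD r 1 0 := fun r _ => pv_col degree r y hy.1 hy.2
    rw [List.map_congr_left hcol]
    by_cases hc : y < max (degree + 1) 0
    · simp only [if_pos hc]
    · simp only [if_neg hc]

-- ===== VERDICT (by name: the statement is the Claim_ definition above) =====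
theorem transform_polynomial_data_spec : Claim_equal_transform_polynomial_data := by
  intro data degree _ hpre
  exact pv_main data degree hpre.1
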